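-- pv_equiv track=rewrite | github.com/Con-Tejus/ECE_448_AI | mp3-code/solve.py | gen_row
-- ===== SOURCE A (Python) =====
-- def gen_row(w, s):
--     """Create all patterns of a row or col that match given runs."""
--     def gen_seg(o, sp):
--         if not o:
--             return [[0] * sp]
--         return [[0] * x + o[0] + tail
--                 for x in range(1, sp - len(o) + 2)
--                 for tail in gen_seg(o[1:], sp - x)]
--     # return [x[1:] for x in gen_seg([[1] * i for i in s], w + 1 - sum(s))]
--     sum = 0
--     for i in s:
--         sum+= i[0]
--
--
--     return [x[1:] for x in gen_seg([[i[1]] * i[0] for i in s], w + 1 - sum)]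
-- ===== SOURCE B (Python) =====
-- def _combs(m, k, start):
--     """All strictly increasing k-tuples from range(start, m), lexicographic."""
--     if k == 0:
--         return [[]]
--     return [[d] + rest
--             for d in range(start, m - k + 1)
--             for rest in _combs(m, k - 1, d + 1)]
--
--
-- def gen_row(w, s):
--     """Create all patterns of a row or col that match given runs."""
--     total = 0
--     blocks = []
--     for c, v in s:
--         total += c
--         blocks.append([v] * c)
--     n = len(s)
--     if n == 0:
--         return [[0] * w]
--     slack = w - total - (n - 1)
--     if slack < 0:
--         return []
--     m = slack + n
--     rows = []
--     for divs in _combs(m, n, 0):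
--         row = []
--         prev = 0
--         for d, blk in zip(divs, blocks):
--             row += [0] * (d - prev) + blk
--             prev = d
--         row += [0] * (m - 1 - prev)
--         rows.append(row)
--     return rows
-- ===== Notes on version B (the rewrite author's own statement) =====
-- stated objective: alternative
-- what changed: Replaces A's recursive gap-by-gap concatenation (which builds every pattern with an extra leading zero and strips it afterwards) with a stars-and-bars enumeration: B lists the divider-position k-subsets of range(slack+n) in lexicographic order and assembles each row in a single zip pass over (dividers, blocks).
import Mathlib
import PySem

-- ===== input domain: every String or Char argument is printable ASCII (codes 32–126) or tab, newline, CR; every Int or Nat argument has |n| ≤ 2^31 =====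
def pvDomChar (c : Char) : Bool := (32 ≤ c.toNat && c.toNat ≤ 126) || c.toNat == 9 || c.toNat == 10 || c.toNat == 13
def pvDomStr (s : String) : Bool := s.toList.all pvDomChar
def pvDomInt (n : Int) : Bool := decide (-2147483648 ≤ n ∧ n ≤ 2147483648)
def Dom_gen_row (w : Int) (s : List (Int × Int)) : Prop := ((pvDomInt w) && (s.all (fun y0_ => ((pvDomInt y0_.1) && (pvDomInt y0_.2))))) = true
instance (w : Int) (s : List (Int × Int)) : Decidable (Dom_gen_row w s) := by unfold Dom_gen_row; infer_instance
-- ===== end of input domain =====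

-- B replaces A's recursive gap-by-gap concatenation with a stars-and-bars enumeration:
-- it lists the divider-position k-subsets lexicographically and assembles each row in one
-- zip pass over (dividers, blocks); objective: alternative (same exponential output cost).

-- ===== PORT A =====
-- Python [0] * x  (negative x gives [])
def pvRepl (x : Int) : List Int := List.replicate x.toNat 0

-- A's inner recursive helper gen_seg
def genSeg : List (List Int) → Int → List (List Int)
  | [], sp => [pvRepl sp]
  | h :: t, sp =>
      (PySem.List.pyRange 1 (sp - (1 + t.length) + 2) 1).flatMap fun x =>
        (genSeg t (sp - x)).map fun tail => pvRepl x ++ h ++ tail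

def gen_row (w : Int) (s : List (Int × Int)) : List (List Int) :=
  let sum := s.foldl (fun acc i => acc + i.1) 0
  (genSeg (s.map fun i => List.replicate i.1.toNat i.2) (w + 1 - sum)).map
    fun x => PySem.List.slice x (some 1) none

-- ===== PORT B =====
-- _combs m k start: strictly increasing k-tuples from range(start, m), lexicographic
def pvCombs (m : Int) : Nat → Int → List (List Int)
  | 0, _ => [[]]
  | k + 1, start =>
      (PySem.List.pyRange start (m - (k + 1) + 1) 1).flatMap fun d =>
        (pvCombs m k (d + 1)).map fun rest => d :: rest

def gen_row_alt (w : Int) (s : List (Int × Int)) : List (List Int) :=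
  let tb := s.foldl (fun (acc : Int × List (List Int)) i =>
      (acc.1 + i.1, acc.2 ++ [List.replicate i.1.toNat i.2])) (0, [])
  let total := tb.1
  let blocks := tb.2
  let n := s.length
  if n = 0 then [pvRepl w]
  else
    let slack := w - total - (n - 1 : Int)
    if slack < 0 then []
    else
      let m := slack + n
      (pvCombs m n 0).map fun divs =>
        let rp := (divs.zip blocks).foldl
          (fun (acc : List Int × Int) db =>
            (acc.1 ++ pvRepl (db.1 - acc.2) ++ db.2, db.1)) ([], 0)
        rp.1 ++ pvRepl (m - 1 - rp.2)

-- ===== PRECONDITION & SPEC =====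
def Spec_gen_row (w : Int) (s : List (Int × Int)) (out : List (List Int)) : Prop := out = gen_row_alt w s
instance (w : Int) (s : List (Int × Int)) (out : List (List Int)) : Decidable (Spec_gen_row w s out) := by unfold Spec_gen_row; infer_instance

-- ===== CLAIM (what is proved, stated in full; the proofs are below) =====
def Claim_equal_gen_row : Prop := ∀ (w : Int) (s : List (Int × Int)), Dom_gen_row w s → Spec_gen_row w s (gen_row w s)

-- ===== LEMMAS AND PROOFS =====

-- assemble a row from blocks and divider positions (trailing space up to m-1)
def pvAsm (m : Int) : List (List Int) → List Int → Int → List Int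
  | [], _, prev => pvRepl (m - 1 - prev)
  | b :: bs, d :: ds, prev => pvRepl (d - prev) ++ b ++ pvAsm m bs ds d
  | _ :: _, [], _ => []

theorem genSeg_eq (m : Int) : ∀ (bs : List (List Int)) (start : Int),
    genSeg bs (m - start) = (pvCombs m bs.length start).map (fun ds => pvAsm m bs ds (start - 1)) := by
  intro bs
  induction bs with
  | nil =>
      intro start
      show [pvRepl (m - start)] = List.map _ [[]]
      simp only [List.map_cons, List.map_nil, pvAsm]
      congr 2
      omega
  | cons b t ih =>
      intro start
      show (PySem.List.pyRange 1 ((m - start) - (1 + (t.length : Int)) + 2) 1).flatMap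
            (fun x => (genSeg t (m - start - x)).map fun tail => pvRepl x ++ b ++ tail) = _
      rw [List.length_cons, pvCombs, List.map_flatMap]
      rw [PySem.List.pyRange_one 1, PySem.List.pyRange_one start]
      have hN : ((m - start) - (1 + (t.length : Int)) + 2 - 1).toNat
          = ((m - ((t.length : Int) + 1) + 1) - start).toNat := by omega
      rw [hN, List.flatMap_map, List.flatMap_map]
      apply List.flatMap_congr
      intro k _
      have hx : m - start - (1 + (k : Int)) = m - (start + (k : Int) + 1) := by ring
      rw [hx, ih (start + (k : Int) + 1), List.map_map, List.map_map]
      apply List.map_congr_left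
      intro rest _
      simp only [Function.comp_apply, pvAsm]
      have h1 : pvRepl (1 + (k : Int)) = pvRepl (start + (k : Int) - (start - 1)) := by
        unfold pvRepl; congr 1; omega
      have h2 : start + (k : Int) + 1 - 1 = start + (k : Int) := by ring
      rw [h1, h2]

theorem pvCombs_head_ge (m : Int) (k : Nat) (start : Int) :
    ∀ ds ∈ pvCombs m k start, ∀ d ds', ds = d :: ds' → start ≤ d := by
  cases k with
  | zero =>
      intro ds hds d ds' he
      simp [pvCombs] at hds
      subst hds; cases he
  | succ k =>
      intro ds hds d ds' he
      simp only [pvCombs, List.mem_flatMap, List.mem_map] at hds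
      obtain ⟨d0, hd0, rest, _, hcons⟩ := hds
      rw [← hcons] at he
      cases he
      exact (PySem.List.mem_pyRange_one.mp hd0).1

theorem pvCombs_length (m : Int) : ∀ (k : Nat) (start : Int),
    ∀ ds ∈ pvCombs m k start, ds.length = k := by
  intro k
  induction k with
  | zero => intro start ds hds; simp [pvCombs] at hds; simp [hds]
  | succ k ih =>
      intro start ds hds
      simp only [pvCombs, List.mem_flatMap, List.mem_map] at hds
      obtain ⟨d0, _, rest, hrest, hcons⟩ := hds
      rw [← hcons]
      simp [ih _ _ hrest]

theorem asm_strip (m : Int) (bs : List (List Int)) (ds : List Int)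
    (h : ∀ d ds', ds = d :: ds' → 0 ≤ d) :
    PySem.List.slice (pvAsm m bs ds (-1)) (some 1) none = pvAsm m bs ds 0 := by
  rw [PySem.List.slice_from_one]
  cases bs with
  | nil =>
      show (pvRepl (m - 1 - (-1))).tail = pvRepl (m - 1 - 0)
      unfold pvRepl
      rw [List.tail_replicate]
      congr 1
      omega
  | cons b bs' =>
      cases ds with
      | nil => rfl
      | cons d ds' =>
          have hd : 0 ≤ d := h d ds' rfl
          show (pvRepl (d - (-1)) ++ b ++ pvAsm m bs' ds' d).tail
              = pvRepl (d - 0) ++ b ++ pvAsm m bs' ds' d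
          have : pvRepl (d - (-1)) = 0 :: pvRepl (d - 0) := by
            unfold pvRepl
            have : (d - (-1)).toNat = (d - 0).toNat + 1 := by omega
            rw [this, List.replicate_succ]
          rw [this]
          rfl

theorem fold_asm (m : Int) : ∀ (ds : List Int) (bs : List (List Int)) (row : List Int) (prev : Int),
    bs.length = ds.length →
    (let rp := (ds.zip bs).foldl
        (fun (acc : List Int × Int) db => (acc.1 ++ pvRepl (db.1 - acc.2) ++ db.2, db.1)) (row, prev)
     rp.1 ++ pvRepl (m - 1 - rp.2)) = row ++ pvAsm m bs ds prev := by
  intro ds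
  induction ds with
  | nil =>
      intro bs row prev hlen
      cases bs with
      | nil => simp [pvAsm]
      | cons b bs' => simp at hlen
  | cons d ds' ih =>
      intro bs row prev hlen
      cases bs with
      | nil => simp at hlen
      | cons b bs' =>
          simp only [List.zip_cons_cons, List.foldl_cons]
          have := ih bs' (row ++ pvRepl (d - prev) ++ b) d (by simpa using hlen)
          simp only at this ⊢
          rw [this]
          simp [pvAsm]

theorem tb_eq : ∀ (s : List (Int × Int)) (t0 : Int) (b0 : List (List Int)),
    s.foldl (fun (acc : Int × List (List Int)) i =>
        (acc.1 + i.1, acc.2 ++ [List.replicate i.1.toNat i.2])) (t0, b0)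
      = (s.foldl (fun acc i => acc + i.1) t0,
         b0 ++ s.map (fun i => List.replicate i.1.toNat i.2)) := by
  intro s
  induction s with
  | nil => intro t0 b0; simp
  | cons p t ih =>
      intro t0 b0
      simp only [List.foldl_cons, List.map_cons]
      rw [ih]
      simp

-- ===== VERDICT (by name: the statement is the Claim_ definition above) =====
theorem gen_row_spec : Claim_equal_gen_row := by
  intro w s _
  unfold Spec_gen_row gen_row gen_row_alt
  simp only [tb_eq, List.nil_append]
  set total := s.foldl (fun acc i => acc + i.1) (0 : Int) with htotal
  set blocks := s.map (fun i : Int × Int => List.replicate i.1.toNat i.2) with hblocks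
  cases s with
  | nil =>
      simp only [List.length_nil]
      show (genSeg [] (w + 1 - total)).map (fun x => PySem.List.slice x (some 1) none) = _
      have ht : total = 0 := by simp [htotal]
      simp only [genSeg, List.map_cons, List.map_nil, ht]
      rw [PySem.List.slice_from_one]
      unfold pvRepl
      rw [List.tail_replicate]
      congr 2
      omega
  | cons p t =>
      have hn : (p :: t).length ≠ 0 := by simp
      simp only [if_neg hn]
      have hm : w + 1 - total = (w - total - ((((p :: t).length : Int)) - 1)) + ((p :: t).length : Int) := by
        ring
      have hlen : blocks.length = (p :: t).length := by simp [hblocks]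
      by_cases hsl : w - total - ((((p :: t).length : Int)) - 1) < 0
      · rw [if_pos hsl]
        have h0 : genSeg blocks (w + 1 - total)
            = (pvCombs (w + 1 - total) blocks.length 0).map
                (fun ds => pvAsm (w + 1 - total) blocks ds (0 - 1)) := by
          have := genSeg_eq (w + 1 - total) blocks 0
          simpa using this
        rw [h0, hlen]
        have : pvCombs (w + 1 - total) (p :: t).length 0 = [] := by
          show pvCombs (w + 1 - total) (t.length + 1) 0 = []
          rw [pvCombs]
          rw [PySem.List.pyRange_one_eq_nil (by simp only [List.length_cons] at hsl; push_cast at hsl ⊢; omega)]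
          rfl
        rw [this]
        rfl
      · rw [if_neg hsl]
        rw [hm]
        set m := (w - total - ((((p :: t).length : Int)) - 1)) + ((p :: t).length : Int) with hmdef
        have h0 : genSeg blocks m
            = (pvCombs m blocks.length 0).map (fun ds => pvAsm m blocks ds (0 - 1)) := by
          have := genSeg_eq m blocks 0
          simpa using this
        rw [h0, hlen, List.map_map]
        apply List.map_congr_left
        intro ds hds
        have hdlen : ds.length = (p :: t).length := pvCombs_length m _ 0 ds hds
        have hasm := fold_asm m ds blocks [] 0 (by omega)
        simp only [List.nil_append] at hasm
        simp only [Function.comp]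
        rw [hasm]
        apply asm_strip
        intro d ds' he
        exact pvCombs_head_ge m _ 0 ds hds d ds' he
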